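-- pv_equiv track=rewrite | github.com/jaredap1995/LeetCode | Python/Medium/graphs/findChampiopn2.py | solution
-- ===== SOURCE A (Python) =====
-- def solution(n, edges):
--     indegree = {i: 0 for i in range(n)}
--     for n1, n2 in edges:
--         indegree[n2] += 1
--
--     champ = []
--     for k, v in indegree.items():
--         if v == 0:
--             champ.append(k)
--
--     return champ[0] if len(champ) == 1 else -1
-- ===== SOURCE B (Python) =====
-- def solution(n, edges):
--     # A unique champion exists iff the distinct edge destinations are n-1 of the
--     # n nodes; it is then the missing one: n(n-1)/2 minus the sum of the others.
--     seen = [False] * n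
--     distinct = 0
--     total = 0
--     for _, v in edges:
--         if not seen[v]:
--             seen[v] = True
--             distinct += 1
--             total += v
--     if distinct != n - 1:
--         return -1
--     return n * (n - 1) // 2 - total
-- ===== Notes on version B (the rewrite author's own statement) =====
-- stated objective: faster
-- what changed: Replaces A's indegree-counting dict and second scan collecting zero-indegree nodes with a single edge pass that accumulates the count and sum of distinct destinations, then reconstructs the unique champion arithmetically as the Gauss sum n(n-1)/2 minus the destination sum (a unique champion exists iff the distinct destinations number n-1).
import Mathlib
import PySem

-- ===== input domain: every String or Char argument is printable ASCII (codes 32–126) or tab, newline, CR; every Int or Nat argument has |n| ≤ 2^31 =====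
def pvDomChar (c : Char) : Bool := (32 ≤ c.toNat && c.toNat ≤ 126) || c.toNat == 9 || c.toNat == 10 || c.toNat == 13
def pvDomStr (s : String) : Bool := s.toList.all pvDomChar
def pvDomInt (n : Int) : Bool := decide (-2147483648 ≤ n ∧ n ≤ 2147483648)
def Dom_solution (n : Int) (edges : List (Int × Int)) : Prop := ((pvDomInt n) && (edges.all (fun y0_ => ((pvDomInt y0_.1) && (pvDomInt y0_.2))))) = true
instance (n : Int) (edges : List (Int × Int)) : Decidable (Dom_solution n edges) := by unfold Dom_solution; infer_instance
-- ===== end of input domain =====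

-- B drops A's per-node indegree dict and the second scan collecting zero-indegree nodes:
-- one edge pass accumulates the count and sum of DISTINCT destinations; a unique champion
-- exists iff that count is n-1, and it is then n(n-1)//2 minus that sum (the timing
-- run measured B faster by a constant factor).


-- ===== PORT A =====
-- indegree = {i: 0 for i in range(n)}; for n1, n2 in edges: indegree[n2] += 1
-- (under Pre_ every n2 is a key, so Dict.modify is exact); then collect zero-indegree keys.
def solution (n : Int) (edges : List (Int × Int)) : Int :=
  -- {i: 0 for i in range(n)}: the keys range(n) are distinct, so the dict IS the
  -- ordered pair list [(0,0), …, (n-1,0)] (exact: equal to inserting them one by one)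
  let indegree0 : PySem.Dict Int Int :=
    PySem.Dict.mk ((PySem.List.pyRange 0 n).map (fun i => (i, 0)))
  let indegree : PySem.Dict Int Int :=
    edges.foldl (fun d e => d.modify e.2 0 (fun x => x + 1)) indegree0
  -- the champ.append loop, as a cons fold building the same list in the same order
  let champ : List Int :=
    indegree.items.foldr (fun kv acc => if kv.2 == 0 then kv.1 :: acc else acc) []
  if champ.length = 1 then PySem.List.pyGetD champ 0 (-1) else -1

-- ===== PORT B =====
-- state (seen, distinct, total); seen[v] read/write with Python's index semantics
-- (pyGetD/pySetD; under Pre_ every v is in range, so they are exact)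
def solution_alt (n : Int) (edges : List (Int × Int)) : Int :=
  let st : List Bool × Int × Int :=
    edges.foldl (fun st e =>
        if PySem.List.pyGetD st.1 e.2 false then st
        else (PySem.List.pySetD st.1 e.2 true, st.2.1 + 1, st.2.2 + e.2))
      (List.replicate n.toNat false, 0, 0)
  if st.2.1 ≠ n - 1 then -1                     -- if distinct != n - 1: return -1
  else PySem.Int.floordiv (n * (n - 1)) 2 - st.2.2   -- n*(n-1)//2 - total

-- ===== PRECONDITION & SPEC =====
-- Pre_ excludes edges whose destination is outside range(n): there A raises KeyError on indegree[n2] += 1.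
def Pre_solution (n : Int) (edges : List (Int × Int)) : Prop :=
  ∀ e ∈ edges, 0 ≤ e.2 ∧ e.2 < n
instance (n : Int) (edges : List (Int × Int)) : Decidable (Pre_solution n edges) := by
  unfold Pre_solution; infer_instance
def pvWitness_solution : Int × (List (Int × Int)) := (3, [(0, 1), (2, 1), (1, 2)])

def Spec_solution (n : Int) (edges : List (Int × Int)) (out : Int) : Prop := out = solution_alt n edges
instance (n : Int) (edges : List (Int × Int)) (out : Int) : Decidable (Spec_solution n edges out) := by unfold Spec_solution; infer_instance

-- ===== CLAIM (what is proved, stated in full; the proofs are below) =====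
def Claim_equal_solution : Prop := ∀ (n : Int) (edges : List (Int × Int)), Dom_solution n edges → Pre_solution n edges → Spec_solution n edges (solution n edges)

-- ===== LEMMAS AND PROOFS =====

-- The champ.append loop over a pair list collects the first components of the zero pairs.
theorem pv_foldr_filter (l : List (Int × Int)) :
    l.foldr (fun kv acc => if kv.2 == 0 then kv.1 :: acc else acc) []
      = (l.filter (fun kv => kv.2 == 0)).map (fun kv => kv.1) := by
  induction l with
  | nil => rfl
  | cons kv t ih =>
    simp only [List.foldr_cons, List.filter_cons, beq_iff_eq] at ih ⊢
    by_cases h : kv.2 = 0 <;> simp [h, ih]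

theorem pv_getD0 (n v : Int) :
    (PySem.Dict.mk ((PySem.List.pyRange 0 n).map (fun i => (i, (0 : Int))))).getD v 0 = 0 := by
  set d0 := PySem.Dict.mk ((PySem.List.pyRange 0 n).map (fun i => (i, (0 : Int)))) with hd0
  cases hq : d0.get? v with
  | none => exact PySem.Dict.getD_of_get?_eq_none d0 0 hq
  | some w =>
    have hmem := PySem.Dict.mem_items_of_get?_eq_some d0 hq
    rcases List.mem_map.mp hmem with ⟨i, _, hi⟩
    have hw : w = 0 := by cases hi; rfl
    rw [PySem.Dict.getD_of_get?_eq_some d0 0 hq, hw]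

-- A's champ list is the in-order list of range(n) elements hit by no edge destination.
theorem pv_champA (n : Int) (edges : List (Int × Int)) (hpre : Pre_solution n edges) :
    (edges.foldl (fun d e => d.modify e.2 0 (fun x => x + 1))
        (PySem.Dict.mk ((PySem.List.pyRange 0 n).map (fun i => (i, (0 : Int)))))).items.foldr
      (fun kv acc => if kv.2 == 0 then kv.1 :: acc else acc) []
    = (PySem.List.pyRange 0 n).filter (fun u => !decide (u ∈ edges.map (fun e => e.2))) := by
  set d0 := PySem.Dict.mk ((PySem.List.pyRange 0 n).map (fun i => (i, (0 : Int)))) with hd0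
  have hfold : edges.foldl (fun d e => d.modify e.2 0 (fun x => x + 1)) d0
      = (edges.map (fun e => e.2)).foldl (fun d x => d.modify x 0 (fun v => v + 1)) d0 := by
    rw [List.foldl_map]
  set dests := edges.map (fun e => e.2) with hdests
  have hdr : ∀ d ∈ dests, 0 ≤ d ∧ d < n := by
    intro d hd
    rcases List.mem_map.mp (hdests ▸ hd) with ⟨e, he, hev⟩
    cases hev
    exact hpre e he
  set d1 := dests.foldl (fun d x => d.modify x 0 (fun v => v + 1)) d0 with hd1
  have hk0 : d0.keys = PySem.List.pyRange 0 n := by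
    rw [hd0]; simp only [PySem.Dict.keys]
    rw [List.map_map]
    exact List.map_id _
  have hkeys : d1.keys = PySem.List.pyRange 0 n := by
    rw [hd1, PySem.Dict.keys_foldl_modify, hk0, PySem.Set.update_eq_append_filter]
    have : (PySem.Set.ofList dests).filter
        (fun y => !(PySem.Set.contains (PySem.List.pyRange 0 n) y)) = [] := by
      rw [List.filter_eq_nil_iff]
      intro y hy
      have hy' : y ∈ dests := (PySem.Set.mem_ofList _ _).mp hy
      simp only [PySem.Set.contains_iff, PySem.List.mem_pyRange_one, Bool.not_eq_true',
        Bool.not_eq_false]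
      exact hdr y hy'
    rw [this, List.append_nil]
  have hnodup : d1.keys.Nodup := by rw [hkeys]; exact PySem.List.nodup_pyRange_one 0 n
  have hgd : ∀ v : Int, d1.getD v 0 = (dests.count v : Int) := by
    intro v
    rw [hd1, PySem.Dict.getD_foldl_modify_add_one, hd0, pv_getD0, zero_add]
  have hitems : d1.items = (PySem.List.pyRange 0 n).map (fun k => (k, (dests.count k : Int))) := by
    rw [PySem.Dict.items_eq_map_keys d1 hnodup 0, hkeys]
    exact List.map_congr_left (fun k _ => by rw [hgd])
  rw [hfold, pv_foldr_filter, hitems, List.filter_map, List.map_map]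
  rw [show ((fun kv : Int × Int => kv.1) ∘ fun k : Int => (k, (dests.count k : Int))) = id from rfl,
      List.map_id]
  apply List.filter_congr
  intro u _
  by_cases h : u ∈ dests <;>
    simp [h, List.count_eq_zero, Int.natCast_eq_zero, Function.comp]

-- Gauss: twice the sum of range(n) is n(n-1).
theorem pv_sum_range (n : Int) (hn : 0 ≤ n) :
    (PySem.List.pyRange 0 n).sum * 2 = n * (n - 1) := by
  induction n, hn using Int.le_induction with
  | base => simp [PySem.List.pyRange_one_eq_nil]
  | succ m hm ih =>
    rw [PySem.List.pyRange_one_succ_right hm, List.sum_append]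
    simp only [List.sum_cons, List.sum_nil]
    linear_combination ih

-- Writing one cell of a range-indexed table of f-values updates f pointwise at that index.
theorem pv_setD_map_range (n d : Int) (f : Int → Bool) (b : Bool) (hd : 0 ≤ d ∧ d < n) :
    PySem.List.pySetD ((PySem.List.pyRange 0 n).map f) d b
      = (PySem.List.pyRange 0 n).map (fun u => if u = d then b else f u) := by
  rw [PySem.List.pySetD_of_nonneg _ _ hd.1]
  apply List.ext_getElem (by simp)
  intro k h1 h2
  simp only [List.getElem_set, List.getElem_map, PySem.List.getElem_pyRange_one, zero_add]
  by_cases hk : (k : Int) = d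
  · have hdk : d.toNat = k := by omega
    simp [hdk, hk]
  · have hdk : d.toNat ≠ k := by omega
    simp [hdk, hk]

-- B's edge pass: folding destinations over (seen table, distinct count, running sum)
-- accumulates exactly the first-occurrence set PySem.Set.update s ds together with its
-- growth in size and in sum.
theorem pv_scan (n : Int) (ds : List Int) (hds : ∀ d ∈ ds, 0 ≤ d ∧ d < n)
    (s : List Int) (D T : Int) :
    ds.foldl (fun st v =>
        if PySem.List.pyGetD st.1 v false then st
        else (PySem.List.pySetD st.1 v true, st.2.1 + 1, st.2.2 + v))
      ((PySem.List.pyRange 0 n).map (fun u => decide (u ∈ s)), D, T)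
    = ((PySem.List.pyRange 0 n).map (fun u => decide (u ∈ PySem.Set.update s ds)),
       D + (((PySem.Set.update s ds).length : Int) - (s.length : Int)),
       T + ((PySem.Set.update s ds).sum - s.sum)) := by
  induction ds generalizing s D T with
  | nil =>
    simp [PySem.Set.update]
  | cons d t ih =>
    have hd := hds d List.mem_cons_self
    have ht : ∀ x ∈ t, 0 ≤ x ∧ x < n := fun x hx => hds x (List.mem_cons_of_mem d hx)
    have hupd : PySem.Set.update s (d :: t) = PySem.Set.update (PySem.Set.add s d) t := by
      simp [PySem.Set.update]
    simp only [List.foldl_cons,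
      PySem.List.pyGetD_map_pyRange_of_nonneg (fun u => decide (u ∈ s)) n d false hd.1 hd.2]
    by_cases hmem : d ∈ s
    · have hadd : PySem.Set.add s d = s := by
        simp [PySem.Set.add, hmem]
      rw [if_pos (by simpa using hmem), ih ht s D T, hupd, hadd]
    · have hadd : PySem.Set.add s d = s ++ [d] := by
        simp [PySem.Set.add, hmem]
      rw [if_neg (by simpa using hmem),
        pv_setD_map_range n d (fun u => decide (u ∈ s)) true hd]
      have hpred : ((PySem.List.pyRange 0 n).map
            (fun u => if u = d then true else decide (u ∈ s)))
          = (PySem.List.pyRange 0 n).map (fun u => decide (u ∈ PySem.Set.add s d)) := by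
        apply List.map_congr_left
        intro u _
        rw [hadd]
        by_cases hu : u = d <;> simp [hu]
      rw [hpred, ih ht (PySem.Set.add s d) (D + 1) (T + d), hupd, hadd]
      have hlen : ((s ++ [d]).length : Int) = (s.length : Int) + 1 := by simp
      have hsum : (s ++ [d]).sum = s.sum + d := by simp
      rw [hlen, hsum]
      ring_nf

-- Splitting a list by a predicate preserves the sum.
theorem pv_sum_split (l : List Int) (p : Int → Bool) :
    (l.filter p).sum + (l.filter (fun x => !p x)).sum = l.sum := by
  induction l with
  | nil => rfl
  | cons x t ih =>
    by_cases h : p x <;> simp [h, ← ih] <;> ring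

-- ===== VERDICT (by name: the statement is the Claim_ definition above) =====
theorem solution_spec : Claim_equal_solution := by
  intro n edges _ hpre
  unfold Spec_solution solution solution_alt
  simp only []
  rw [pv_champA n edges hpre]
  set dests := edges.map (fun e => e.2) with hdests
  set S := PySem.Set.ofList dests with hS
  set R := PySem.List.pyRange 0 n with hR
  set C := R.filter (fun u => !decide (u ∈ dests)) with hC
  have hdr : ∀ d ∈ dests, 0 ≤ d ∧ d < n := by
    intro d hd
    rcases List.mem_map.mp (hdests ▸ hd) with ⟨e, he, hev⟩
    cases hev
    exact hpre e he
  -- B's edge pass over the fresh seen table yields (|S|, sum S)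
  have hfold : edges.foldl (fun st e =>
        if PySem.List.pyGetD st.1 e.2 false then st
        else (PySem.List.pySetD st.1 e.2 true, st.2.1 + 1, st.2.2 + e.2))
      (List.replicate n.toNat false, (0 : Int), (0 : Int))
      = (R.map (fun u => decide (u ∈ S)), ((S.length : Int), S.sum)) := by
    have hinit : List.replicate n.toNat false
        = R.map (fun u => decide (u ∈ ([] : List Int))) := by
      simp [hR, List.map_const', PySem.List.length_pyRange_one]
    have hupd : PySem.Set.update ([] : List Int) dests = S := by
      rw [hS, PySem.Set.ofList_eq_foldl, PySem.Set.update]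
    have e1 : edges.foldl (fun st e =>
          if PySem.List.pyGetD st.1 e.2 false then st
          else (PySem.List.pySetD st.1 e.2 true, st.2.1 + 1, st.2.2 + e.2))
        (List.replicate n.toNat false, (0 : Int), (0 : Int))
        = dests.foldl (fun st v =>
          if PySem.List.pyGetD st.1 v false then st
          else (PySem.List.pySetD st.1 v true, st.2.1 + 1, st.2.2 + v))
        (List.replicate n.toNat false, (0 : Int), (0 : Int)) := by
      rw [hdests, List.foldl_map]
    rw [e1, hinit, pv_scan n dests hdr [] 0 0, hupd]
    norm_num
    rfl
  rw [hfold]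
  -- the in-range destinations hit by edges, as a sublist of R, permute the set S
  have hperm : (R.filter (fun u => decide (u ∈ dests))).Perm S := by
    rw [List.perm_ext_iff_of_nodup
      (List.Nodup.filter _ (hR ▸ PySem.List.nodup_pyRange_one 0 n)) (PySem.Set.nodup_ofList dests)]
    intro a
    simp only [List.mem_filter, decide_eq_true_eq, PySem.Set.mem_ofList, hR,
      PySem.List.mem_pyRange_one]
    exact ⟨fun h => h.2, fun h => ⟨hdr a h, h⟩⟩
  have hlen : C.length + S.length = R.length := by
    rw [hC, ← hperm.length_eq,
      Nat.add_comm, ← List.length_eq_length_filter_add]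
  have hsum : C.sum + S.sum = R.sum := by
    rw [hC, ← hperm.sum_eq]
    linarith [pv_sum_split R (fun u => decide (u ∈ dests))]
  have hRlen : (R.length : Int) = max n 0 := by
    rw [hR, PySem.List.length_pyRange_one]; omega
  by_cases hb : (S.length : Int) = n - 1
  · -- exactly one champion: C is a singleton and its element is the Gauss difference
    have hn : 1 ≤ n := by omega
    have hC1 : C.length = 1 := by omega
    rw [if_pos hC1, if_neg (by simpa using hb)]
    rcases List.length_eq_one_iff.mp hC1 with ⟨c, hc⟩
    have hsumR : R.sum * 2 = n * (n - 1) := pv_sum_range n (by omega)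
    have hfd : PySem.Int.floordiv (n * (n - 1)) 2 = R.sum := by
      rw [← hsumR, PySem.Int.floordiv_eq_ediv_of_pos (by omega)]
      omega
    have hcs : C.sum = c := by rw [hc]; simp
    rw [hc]
    simp only [PySem.List.pyGetD, PySem.List.pyGet?]
    norm_num [PySem.List.pyIdx?, hfd]
    omega
  · -- no unique champion on either side
    have hC1 : C.length ≠ 1 := by omega
    rw [if_neg hC1, if_pos (by simpa using hb)]
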